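-- pv_equiv track=rewrite | github.com/avelurin/scripts | domino_game.py | computers_choose
-- ===== SOURCE A (Python) =====
-- def computers_choose(snake, comp_pi):
--     nimbers_value = {}
--     for number in range(7):
--         counter = 0
--         for piece in snake:
--             counter += piece.count(number)
--         for piece in comp_pi:
--             counter += piece.count(number)
--         nimbers_value[number] = counter
--     pi_value = []
--     picese_set = comp_pi.copy()
--     for piece in comp_pi:
--         value = nimbers_value[piece[0]] + nimbers_value[piece[1]]
--         pi_value.append(value)
--     while True:
--         if len(picese_set) == 0:
--             return "0"
--         best_value = max(pi_value)
--         index = pi_value.index(best_value)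
--         removed_value = pi_value.pop(index)
--         chosed_piece = picese_set.pop(index)
--         if snake[0][0] in [chosed_piece[0], chosed_piece[1]]:
--             sign = "-"
--             break
--         elif snake[-1][-1] in [chosed_piece[0], chosed_piece[1]]:
--             sign = ""
--             break
--     index = str(comp_pi.index(chosed_piece) + 1)
--     chose = sign + index
--     return chose
-- ===== SOURCE B (Python) =====
-- def computers_choose(snake, comp_pi):
--     cnt = [0] * 7
--     for piece in snake + comp_pi:
--         for x in piece:
--             if 0 <= x <= 6:
--                 cnt[x] = cnt[x] + 1
--     best = None  # (value, piece): best-valued playable piece seen so far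
--     for p in comp_pi:
--         if snake[0][0] in (p[0], p[1]) or snake[-1][-1] in (p[0], p[1]):
--             v = cnt[p[0]] + cnt[p[1]]
--             if best is None or v > best[0]:
--                 best = (v, p)
--     if best is None:
--         return "0"
--     p = best[1]
--     sign = "-" if snake[0][0] in (p[0], p[1]) else ""
--     return sign + str(comp_pi.index(p) + 1)
-- ===== Notes on version B (the rewrite author's own statement) =====
-- stated objective: faster
-- what changed: A repeatedly extracts the max-valued piece with max/index/pop until one connects; B builds the pip table in one pass and then does a single argmax scan over the connecting pieces (first strictly-best kept, matching A's tie-break).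
import Mathlib
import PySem

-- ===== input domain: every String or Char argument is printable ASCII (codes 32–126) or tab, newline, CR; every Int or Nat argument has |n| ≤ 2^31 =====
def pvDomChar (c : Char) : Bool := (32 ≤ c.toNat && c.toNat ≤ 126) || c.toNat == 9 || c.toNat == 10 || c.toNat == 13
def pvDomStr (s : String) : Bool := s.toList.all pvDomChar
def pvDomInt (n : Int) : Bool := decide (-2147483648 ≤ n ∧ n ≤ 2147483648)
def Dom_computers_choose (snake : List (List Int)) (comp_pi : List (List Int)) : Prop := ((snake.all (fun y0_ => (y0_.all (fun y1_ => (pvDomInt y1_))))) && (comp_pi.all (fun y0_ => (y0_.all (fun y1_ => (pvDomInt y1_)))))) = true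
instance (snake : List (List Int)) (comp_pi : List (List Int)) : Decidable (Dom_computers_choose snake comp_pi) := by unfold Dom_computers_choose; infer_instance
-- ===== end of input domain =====

-- B replaces A's repeated max/index/pop selection loop by a single argmax pass over the hand (same result, one linear scan in place of repeated extraction).


-- ===== PORT A =====
-- p[i] for an index that Pre_ guarantees in range (exact there; Python raises outside Pre_)
def pvG (p : List Int) (i : Int) : Int := PySem.List.pyGetD p i 0

-- counter = sum of piece.count(number) over snake then comp_pi
def pvCounterFor (snake comp_pi : List (List Int)) (number : Int) : Int :=
  comp_pi.foldl (fun counter piece => counter + (PySem.List.count piece number : Int))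
    (snake.foldl (fun counter piece => counter + (PySem.List.count piece number : Int)) 0)

-- nimbers_value = {number: counter for number in range(7)} built exactly as A does
def pvNimbers (snake comp_pi : List (List Int)) : PySem.Dict Int Int :=
  (PySem.List.pyRange 0 7 1).foldl
    (fun d number => d.insert number (pvCounterFor snake comp_pi number)) PySem.Dict.empty

-- nimbers_value[piece[0]] + nimbers_value[piece[1]]; Dict.getD is exact under Pre_ (keys 0..6 present)
def pvValue (nim : PySem.Dict Int Int) (piece : List Int) : Int :=
  PySem.Dict.getD nim (pvG piece 0) 0 + PySem.Dict.getD nim (pvG piece 1) 0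

-- the while-loop: fuel = initial len(picese_set); each iteration pops exactly one element,
-- so fuel never runs out and the "" branches (Python exceptions / desync, impossible here) are unreachable
def pvLoopA (s00 sLL : Int) (comp_pi : List (List Int)) :
    Nat → List Int → List (List Int) → String
  | fuel, pi_value, picese_set =>
    if picese_set.length = 0 then "0"
    else
      match fuel with
      | 0 => ""
      | fuel' + 1 =>
        match PySem.List.max? pi_value (fun y => y) with
        | none => ""
        | some best_value =>
          match PySem.List.index? pi_value best_value with
          | none => ""
          | some index =>
            match PySem.List.pop? pi_value (index : Int), PySem.List.pop? picese_set (index : Int) with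
            | some (_, pi_value'), some (chosed_piece, picese_set') =>
              if s00 = pvG chosed_piece 0 ∨ s00 = pvG chosed_piece 1 then
                "-" ++ PySem.Int.toStr ((((PySem.List.index? comp_pi chosed_piece).getD 0 : Nat) : Int) + 1)
              else if sLL = pvG chosed_piece 0 ∨ sLL = pvG chosed_piece 1 then
                "" ++ PySem.Int.toStr ((((PySem.List.index? comp_pi chosed_piece).getD 0 : Nat) : Int) + 1)
              else pvLoopA s00 sLL comp_pi fuel' pi_value' picese_set'
            | _, _ => ""

def computers_choose (snake : List (List Int)) (comp_pi : List (List Int)) : String :=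
  let nim := pvNimbers snake comp_pi
  let pi_value := comp_pi.foldl (fun acc piece => acc ++ [pvValue nim piece]) []
  let s00 := pvG (PySem.List.pyGetD snake 0 []) 0      -- snake[0][0]
  let sLL := PySem.List.pyGetD (PySem.List.pyGetD snake (-1) []) (-1) 0  -- snake[-1][-1]
  pvLoopA s00 sLL comp_pi comp_pi.length pi_value comp_pi

-- ===== PORT B =====
-- cnt[x] += 1 guarded by 0 <= x <= 6 (index known nonnegative, so .toNat is exact)
def pvBump (cnt : List Int) (x : Int) : List Int :=
  if 0 ≤ x ∧ x ≤ 6 then cnt.set x.toNat (cnt.getD x.toNat 0 + 1) else cnt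

-- cnt = [0]*7 then one pass over snake + comp_pi
def pvCnt (snake comp_pi : List (List Int)) : List Int :=
  (snake ++ comp_pi).foldl (fun c piece => piece.foldl pvBump c) (List.replicate 7 0)

-- cnt[p[0]] + cnt[p[1]] (pyGetD: Python list indexing, negative indices from the end)
def pvValB (cnt : List Int) (p : List Int) : Int :=
  PySem.List.pyGetD cnt (pvG p 0) 0 + PySem.List.pyGetD cnt (pvG p 1) 0

-- one step of B's argmax pass: keep the first strictly-best connecting piece
def pvStep (s00 sLL : Int) (v : List Int → Int)
    (best : Option (Int × List Int)) (p : List Int) : Option (Int × List Int) :=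
  if (s00 = pvG p 0 ∨ s00 = pvG p 1) ∨ (sLL = pvG p 0 ∨ sLL = pvG p 1) then
    match best with
    | none => some (v p, p)
    | some b => if b.1 < v p then some (v p, p) else best
  else best

-- B's epilogue: "0" if nothing connects, else sign + str(comp_pi.index(p) + 1)
def pvFinish (s00 : Int) (comp_pi : List (List Int)) (best : Option (Int × List Int)) : String :=
  match best with
  | none => "0"
  | some b =>
    (if s00 = pvG b.2 0 ∨ s00 = pvG b.2 1 then "-" else "")
      ++ PySem.Int.toStr ((((PySem.List.index? comp_pi b.2).getD 0 : Nat) : Int) + 1)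

def computers_choose_alt (snake : List (List Int)) (comp_pi : List (List Int)) : String :=
  let cnt := pvCnt snake comp_pi
  let s00 := pvG (PySem.List.pyGetD snake 0 []) 0
  let sLL := PySem.List.pyGetD (PySem.List.pyGetD snake (-1) []) (-1) 0
  pvFinish s00 comp_pi (comp_pi.foldl (pvStep s00 sLL (pvValB cnt)) none)

-- ===== PRECONDITION & SPEC =====
-- Pre_ excludes exactly the inputs where A raises: with a non-empty hand A indexes snake[0][0]
-- and snake[-1][-1] (IndexError) and looks piece[0], piece[1] up in a dict keyed 0..6
-- (IndexError/KeyError); with an empty hand A returns "0" unconditionally.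
def Pre_computers_choose (snake : List (List Int)) (comp_pi : List (List Int)) : Prop :=
  comp_pi = [] ∨
  (snake ≠ [] ∧ snake.headD [] ≠ [] ∧ snake.getLastD [] ≠ [] ∧
    ∀ p ∈ comp_pi, 2 ≤ p.length ∧
      (0 ≤ p.getD 0 0 ∧ p.getD 0 0 ≤ 6) ∧ (0 ≤ p.getD 1 0 ∧ p.getD 1 0 ≤ 6))
instance (snake : List (List Int)) (comp_pi : List (List Int)) : Decidable (Pre_computers_choose snake comp_pi) := by unfold Pre_computers_choose; infer_instance

def pvWitness_computers_choose : List (List Int) × List (List Int) := ([[1, 2]], [[2, 3]])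

def Spec_computers_choose (snake : List (List Int)) (comp_pi : List (List Int)) (out : String) : Prop := out = computers_choose_alt snake comp_pi
instance (snake : List (List Int)) (comp_pi : List (List Int)) (out : String) : Decidable (Spec_computers_choose snake comp_pi out) := by unfold Spec_computers_choose; infer_instance

-- ===== CLAIM (what is proved, stated in full; the proofs are below) =====
def Claim_equal_computers_choose : Prop := ∀ (snake : List (List Int)) (comp_pi : List (List Int)), Dom_computers_choose snake comp_pi → Pre_computers_choose snake comp_pi → Spec_computers_choose snake comp_pi (computers_choose snake comp_pi)

-- ===== LEMMAS AND PROOFS =====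

-- B's pass never replaces the incumbent by anything of value ≤ it
theorem pvStep_stays (s00 sLL : Int) (v : List Int → Int) (l : List (List Int))
    (a : Int × List Int) (h : ∀ q ∈ l, v q ≤ a.1) :
    l.foldl (pvStep s00 sLL v) (some a) = some a := by
  induction l with
  | nil => rfl
  | cons q t ih =>
    have hq := h q (by simp)
    have ht : ∀ q ∈ t, v q ≤ a.1 := fun r hr => h r (by simp [hr])
    have hstep : pvStep s00 sLL v (some a) q = some a := by
      unfold pvStep
      split
      · simp [not_lt.mpr hq]
      · rfl
    simp only [List.foldl_cons, hstep]
    exact ih ht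

-- the accumulator of B's pass is none or some (v q, q) for a q of the list
theorem pvStep_inv (s00 sLL : Int) (v : List Int → Int) (l : List (List Int))
    (acc : Option (Int × List Int)) :
    l.foldl (pvStep s00 sLL v) acc = acc ∨
      ∃ q ∈ l, l.foldl (pvStep s00 sLL v) acc = some (v q, q) := by
  induction l generalizing acc with
  | nil => left; rfl
  | cons q t ih =>
    simp only [List.foldl_cons]
    have hstep : pvStep s00 sLL v acc q = acc ∨ pvStep s00 sLL v acc q = some (v q, q) := by
      unfold pvStep
      split
      · rcases acc with _ | b
        · right; rfl
        · dsimp only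
          split
          · right; rfl
          · left; rfl
      · left; rfl
    rcases ih (pvStep s00 sLL v acc q) with h1 | ⟨r, hr, hres⟩
    · rcases hstep with h2 | h2
      · left; rw [h1, h2]
      · right; exact ⟨q, by simp, by rw [h1, h2]⟩
    · right; exact ⟨r, by simp [hr], hres⟩

-- if the first global maximum connects, B's pass returns exactly it
theorem pvStep_max (s00 sLL : Int) (v : List Int → Int) (pre suf : List (List Int))
    (piece : List Int)
    (hpre : ∀ q ∈ pre, v q < v piece) (hsuf : ∀ q ∈ suf, v q ≤ v piece)
    (hconn : (s00 = pvG piece 0 ∨ s00 = pvG piece 1) ∨ (sLL = pvG piece 0 ∨ sLL = pvG piece 1)) :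
    (pre ++ piece :: suf).foldl (pvStep s00 sLL v) none = some (v piece, piece) := by
  rw [List.foldl_append, List.foldl_cons]
  have hmid : pvStep s00 sLL v (pre.foldl (pvStep s00 sLL v) none) piece = some (v piece, piece) := by
    rcases pvStep_inv s00 sLL v pre none with h1 | ⟨q, hq, h1⟩
    · rw [h1]; unfold pvStep; simp [hconn]
    · rw [h1]; unfold pvStep; simp [hconn, hpre q hq]
  rw [hmid]
  exact pvStep_stays s00 sLL v suf (v piece, piece) hsuf

-- A's selection loop computes B's single-pass result
theorem pvLoopA_eq (s00 sLL : Int) (comp_pi : List (List Int)) (v : List Int → Int) :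
    ∀ (fuel : Nat) (ps : List (List Int)), ps.length ≤ fuel →
      pvLoopA s00 sLL comp_pi fuel (ps.map v) ps =
        pvFinish s00 comp_pi (ps.foldl (pvStep s00 sLL v) none) := by
  intro fuel
  induction fuel with
  | zero =>
    intro ps hle
    have hnil : ps = [] := List.length_eq_zero_iff.mp (Nat.le_zero.mp hle)
    subst hnil; rfl
  | succ fuel' ih =>
    intro ps hle
    by_cases hnil : ps = []
    · subst hnil; rfl
    have hlen : ¬ ps.length = 0 := by simpa [List.length_eq_zero_iff] using hnil
    rcases hmax : PySem.List.max? (ps.map v) (fun y => y) with _ | m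
    · rw [PySem.List.max?_eq_none_iff] at hmax; simp [hnil] at hmax
    have hmemm : m ∈ ps.map v := PySem.List.max?_mem hmax
    have hisMax := PySem.List.max?_isMax hmax
    rcases hsome : PySem.List.index? (ps.map v) m with _ | idx
    · have h := (PySem.List.index?_isSome_iff (ps.map v) m).mpr hmemm
      rw [hsome] at h; simp at h
    obtain ⟨P, S, hPS, hPlen, hmP⟩ := (PySem.List.index?_eq_some_iff _ _ _).mp hsome
    obtain ⟨pre, rest2, hps, hpreP, hrest2⟩ := List.map_eq_append_iff.mp hPS
    obtain ⟨piece, suf, hrest, hvpiece, hsufS⟩ := List.map_eq_cons_iff.mp hrest2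
    subst hrest
    subst hps
    have hprelen : pre.length = idx := by rw [← hPlen, ← hpreP]; simp
    have hidxlt : idx < (pre ++ piece :: suf).length := by simp; omega
    have hidxltm : idx < ((pre ++ piece :: suf).map v).length := by simpa using hidxlt
    have hget : (pre ++ piece :: suf)[idx]'hidxlt = piece := by
      subst hprelen
      rw [List.getElem_append_right (Nat.le_refl _)]
      simp
    have herase : (pre ++ piece :: suf).eraseIdx idx = pre ++ suf := by
      subst hprelen
      rw [List.eraseIdx_append_of_length_le (Nat.le_refl _)]
      simp
    have heraseM : ((pre ++ piece :: suf).map v).eraseIdx idx = (pre ++ suf).map v := by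
      rw [hPS]
      subst hPlen
      rw [← hpreP, List.eraseIdx_append_of_length_le (by simp)]
      simp [hsufS]
    have hpop1 : PySem.List.pop? ((pre ++ piece :: suf).map v) (idx : Int) =
        some (((pre ++ piece :: suf).map v)[idx]'hidxltm, (pre ++ suf).map v) := by
      rw [PySem.List.pop?_natCast _ _ hidxltm, heraseM]
    have hpop2 : PySem.List.pop? (pre ++ piece :: suf) (idx : Int) =
        some (piece, pre ++ suf) := by
      rw [PySem.List.pop?_natCast _ _ hidxlt, hget, herase]
    have hvm : v piece = m := hvpiece
    have hpre : ∀ q ∈ pre, v q < v piece := by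
      intro q hq
      have h1 : v q ≤ m := hisMax (v q) (List.mem_map_of_mem (by simp [hq]))
      have h2 : v q ≠ m := fun h => hmP (h ▸ (hpreP ▸ List.mem_map_of_mem hq))
      rw [hvm]; omega
    have hsuf : ∀ q ∈ suf, v q ≤ v piece := by
      intro q hq
      rw [hvm]
      exact hisMax (v q) (List.mem_map_of_mem (by simp [hq]))
    rw [pvLoopA]
    simp only [if_neg hlen, hmax, hsome, hpop1, hpop2]
    by_cases h1 : s00 = pvG piece 0 ∨ s00 = pvG piece 1
    · rw [if_pos h1,
        pvStep_max s00 sLL v pre suf piece hpre hsuf (Or.inl h1)]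
      simp [pvFinish, h1]
    · rw [if_neg h1]
      by_cases h2 : sLL = pvG piece 0 ∨ sLL = pvG piece 1
      · rw [if_pos h2,
          pvStep_max s00 sLL v pre suf piece hpre hsuf (Or.inr h2)]
        simp [pvFinish, h1]
      · rw [if_neg h2]
        have hstepid : ∀ acc, pvStep s00 sLL v acc piece = acc := by
          intro acc; unfold pvStep; rw [if_neg (by tauto)]
        have hle' : (pre ++ suf).length ≤ fuel' := by
          simp at hle ⊢; omega
        rw [ih (pre ++ suf) hle']
        simp only [List.foldl_append, List.foldl_cons, hstepid]

-- one bump changes only slot x, by one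
theorem pvBump_len (cnt : List Int) (x : Int) : (pvBump cnt x).length = cnt.length := by
  unfold pvBump; split <;> simp

theorem pvBump_getD (cnt : List Int) (x k : Int) (hk0 : 0 ≤ k) (hk6 : k ≤ 6)
    (hlen : cnt.length = 7) :
    (pvBump cnt x).getD k.toNat 0 = cnt.getD k.toNat 0 + (if x = k then 1 else 0) := by
  unfold pvBump
  by_cases hx : 0 ≤ x ∧ x ≤ 6
  · rw [if_pos hx]
    by_cases hxk : x = k
    · subst hxk
      have h : x.toNat < cnt.length := by omega
      simp [List.getD_eq_getElem?_getD, h]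
    · have h : x.toNat ≠ k.toNat := by omega
      simp [List.getD_eq_getElem?_getD, List.getElem?_set_ne h, hxk]
  · rw [if_neg hx]
    have h : ¬ x = k := by rintro rfl; exact hx ⟨hk0, hk6⟩
    simp [h]

-- counting: B's bump pass over one piece adds piece.count(k) at slot k (0 ≤ k ≤ 6)
theorem pvBump_piece (k : Int) (hk0 : 0 ≤ k) (hk6 : k ≤ 6) :
    ∀ (piece : List Int) (cnt : List Int), cnt.length = 7 →
      (piece.foldl pvBump cnt).length = 7 ∧
      (piece.foldl pvBump cnt).getD k.toNat 0 = cnt.getD k.toNat 0 + (PySem.List.count piece k : Int) := by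
  intro piece
  induction piece with
  | nil => intro cnt hlen; simp [PySem.List.count_eq, hlen]
  | cons x rest ih =>
    intro cnt hlen
    have hlen' : (pvBump cnt x).length = 7 := by rw [pvBump_len, hlen]
    obtain ⟨hl, hg⟩ := ih (pvBump cnt x) hlen'
    refine ⟨hl, ?_⟩
    rw [List.foldl_cons] at *
    rw [hg, pvBump_getD cnt x k hk0 hk6 hlen]
    simp only [PySem.List.count_eq, List.count_cons]
    by_cases hxk : x = k
    · simp [hxk]; ring
    · simp [hxk]

theorem pvCnt_fold (k : Int) (hk0 : 0 ≤ k) (hk6 : k ≤ 6) :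
    ∀ (l : List (List Int)) (cnt : List Int), cnt.length = 7 →
      (l.foldl (fun c piece => piece.foldl pvBump c) cnt).length = 7 ∧
      (l.foldl (fun c piece => piece.foldl pvBump c) cnt).getD k.toNat 0 =
        cnt.getD k.toNat 0 + (l.map (fun p => (PySem.List.count p k : Int))).sum := by
  intro l
  induction l with
  | nil => intro cnt hlen; simp [hlen]
  | cons p t ih =>
    intro cnt hlen
    obtain ⟨hl1, hg1⟩ := pvBump_piece k hk0 hk6 p cnt hlen
    obtain ⟨hl2, hg2⟩ := ih (p.foldl pvBump cnt) hl1
    refine ⟨hl2, ?_⟩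
    rw [List.foldl_cons] at *
    rw [hg2, hg1]
    simp
    ring

-- B's table agrees with A's counter at every key 0..6
theorem pvCnt_eq (snake comp_pi : List (List Int)) (k : Int) (hk0 : 0 ≤ k) (hk6 : k ≤ 6) :
    (pvCnt snake comp_pi).getD k.toNat 0 = pvCounterFor snake comp_pi k := by
  unfold pvCnt pvCounterFor
  obtain ⟨_, hg⟩ := pvCnt_fold k hk0 hk6 (snake ++ comp_pi) (List.replicate 7 0) (by simp)
  rw [hg, PySem.List.foldl_add, PySem.List.foldl_add]
  have h7 : k.toNat < 7 := by omega
  rw [List.getD_eq_getElem?_getD, List.getElem?_replicate]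
  simp [h7]

-- A's dict agrees with A's counter at every key 0..6
theorem pvNimbers_getD (snake comp_pi : List (List Int)) (k : Int) (hk0 : 0 ≤ k) (hk6 : k ≤ 6) :
    PySem.Dict.getD (pvNimbers snake comp_pi) k 0 = pvCounterFor snake comp_pi k := by
  unfold pvNimbers
  rw [show PySem.List.pyRange 0 7 1 = ([0, 1, 2, 3, 4, 5, 6] : List Int) from by decide]
  have hk : k = 0 ∨ k = 1 ∨ k = 2 ∨ k = 3 ∨ k = 4 ∨ k = 5 ∨ k = 6 := by omega
  simp only [List.foldl_cons, List.foldl_nil]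
  rcases hk with rfl | rfl | rfl | rfl | rfl | rfl | rfl <;>
    simp [PySem.Dict.getD, PySem.Dict.get?_insert_self, PySem.Dict.get?_insert_of_ne]

theorem pvCnt_len (snake comp_pi : List (List Int)) : (pvCnt snake comp_pi).length = 7 :=
  (pvCnt_fold 0 (by omega) (by omega) (snake ++ comp_pi) (List.replicate 7 0) (by simp)).1

-- Python list read at a key 0..6 is the table entry
theorem pvCnt_read (snake comp_pi : List (List Int)) (k : Int) (hk0 : 0 ≤ k) (hk6 : k ≤ 6) :
    PySem.List.pyGetD (pvCnt snake comp_pi) k 0 = (pvCnt snake comp_pi).getD k.toNat 0 := by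
  have hlen := pvCnt_len snake comp_pi
  rw [PySem.List.pyGetD_eq_getElem _ _ hk0 (by rw [hlen]; exact_mod_cast by omega)]
  rw [List.getD_eq_getElem?_getD, List.getElem?_eq_getElem (by omega : k.toNat < (pvCnt snake comp_pi).length)]
  rfl

-- under Pre_, the two value functions agree on every piece of the hand
theorem pvValue_eq (snake comp_pi : List (List Int)) (p : List Int)
    (hp : 2 ≤ p.length ∧ (0 ≤ p.getD 0 0 ∧ p.getD 0 0 ≤ 6) ∧ (0 ≤ p.getD 1 0 ∧ p.getD 1 0 ≤ 6)) :
    pvValue (pvNimbers snake comp_pi) p = pvValB (pvCnt snake comp_pi) p := by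
  obtain ⟨hlen, h0, h1⟩ := hp
  have hg0 : pvG p 0 = p.getD 0 0 := PySem.List.pyGetD_zero p 0
  have hg1 : pvG p 1 = p.getD 1 0 := by
    unfold pvG
    rw [PySem.List.pyGetD_eq_getElem p 0 (by omega) (by exact_mod_cast by omega)]
    rw [List.getD_eq_getElem?_getD, List.getElem?_eq_getElem (by omega : 1 < p.length)]
    rfl
  unfold pvValue pvValB
  rw [hg0, hg1]
  rw [pvCnt_read snake comp_pi _ h0.1 h0.2, pvCnt_read snake comp_pi _ h1.1 h1.2]
  rw [pvNimbers_getD snake comp_pi _ h0.1 h0.2, pvNimbers_getD snake comp_pi _ h1.1 h1.2,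
    pvCnt_eq snake comp_pi _ h0.1 h0.2, pvCnt_eq snake comp_pi _ h1.1 h1.2]

-- ===== VERDICT (by name: the statement is the Claim_ definition above) =====
theorem computers_choose_spec : Claim_equal_computers_choose := by
  intro snake comp_pi _hdom hpre
  unfold Spec_computers_choose computers_choose computers_choose_alt
  dsimp only
  rw [PySem.List.foldl_append_singleton_eq_map (pvValue (pvNimbers snake comp_pi)) comp_pi [],
    List.nil_append]
  rw [pvLoopA_eq _ _ comp_pi (pvValue (pvNimbers snake comp_pi)) comp_pi.length comp_pi (le_refl _)]
  refine congrArg (pvFinish _ comp_pi) ?_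
  refine PySem.List.foldl_congr_mem comp_pi _ _ none ?_
  intro acc p hp
  have hall : 2 ≤ p.length ∧ (0 ≤ p.getD 0 0 ∧ p.getD 0 0 ≤ 6) ∧
      (0 ≤ p.getD 1 0 ∧ p.getD 1 0 ≤ 6) := by
    rcases hpre with hnil | ⟨_, _, _, hall⟩
    · subst hnil; simp at hp
    · exact hall p hp
  have hv := pvValue_eq snake comp_pi p hall
  unfold pvStep
  rw [hv]
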